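-- pv_equiv track=rewrite | github.com/absalomhr/TheoryOfComputation | CHESS.py | routes
-- ===== SOURCE A (Python) =====
-- def routes(current, path):
--     #diccionario de estados
--     switch = {
--             'a': {'W': 'e', 'R': 'bd'},
--             'b': {'W': 'ace', 'R': 'df'},
--             'c': {'W': 'e', 'R': 'bf'},
--             'd': {'W': 'aeg', 'R': 'bh'},
--             'e': {'W': 'acgi', 'R': 'bdfh'},
--             'f': {'W': 'cei', 'R': 'bh'},
--             'g': {'W': 'e', 'R': 'dh'},
--             'h': {'W': 'egi', 'R': 'df'},
--             'i': {'W': 'e', 'R': 'fh'},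
--             }
--     #cuando el camino es vacio, regresa el mismo estado
--     if not path:
--         yield current
--         return
--     #primer caracter del camino y el resto en tupla
--     first, *newpath = path
--     #nuevo camino a seguir
--     for state in switch[current][first]:
--         #calculo de nuevo camino
--         for route in routes(state, newpath):
--             #regresa todo el camino en un generador
--             yield current + route
-- ===== SOURCE B (Python) =====
-- def routes(current, path):
--     # flat move table keyed by (state, colour) pairs
--     moves = {
--         ('a', 'W'): 'e',    ('a', 'R'): 'bd',
--         ('b', 'W'): 'ace',  ('b', 'R'): 'df',
--         ('c', 'W'): 'e',    ('c', 'R'): 'bf',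
--         ('d', 'W'): 'aeg',  ('d', 'R'): 'bh',
--         ('e', 'W'): 'acgi', ('e', 'R'): 'bdfh',
--         ('f', 'W'): 'cei',  ('f', 'R'): 'bh',
--         ('g', 'W'): 'e',    ('g', 'R'): 'dh',
--         ('h', 'W'): 'egi',  ('h', 'R'): 'df',
--         ('i', 'W'): 'e',    ('i', 'R'): 'fh',
--     }
--     if not path:
--         yield current
--         return
--     # dynamic programming right-to-left: suffixes[s] lists, in DFS order, every
--     # route through path[1:] that starts at state s; each table is computed once
--     # per level instead of once per visit of the recursion tree.
--     suffixes = {s: [s] for s in 'abcdefghi'}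
--     for step in reversed(path[1:]):
--         suffixes = {s: [s + t for n in moves[s, step] for t in suffixes[n]]
--                     for s in 'abcdefghi'}
--     for n in moves[current, path[0]]:
--         for t in suffixes[n]:
--             yield current + t
-- ===== Notes on version B (the rewrite author's own statement) =====
-- stated objective: alternative
-- what changed: Replaced the top-down recursive generator by a bottom-up dynamic program over a flat (state, colour)-keyed move table: a suffix table mapping each of the nine states to all its routes through the remaining path is built once per level by folding over the reversed path, so shared subproblems are computed once instead of once per visit of the recursion tree.
import Mathlib
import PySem

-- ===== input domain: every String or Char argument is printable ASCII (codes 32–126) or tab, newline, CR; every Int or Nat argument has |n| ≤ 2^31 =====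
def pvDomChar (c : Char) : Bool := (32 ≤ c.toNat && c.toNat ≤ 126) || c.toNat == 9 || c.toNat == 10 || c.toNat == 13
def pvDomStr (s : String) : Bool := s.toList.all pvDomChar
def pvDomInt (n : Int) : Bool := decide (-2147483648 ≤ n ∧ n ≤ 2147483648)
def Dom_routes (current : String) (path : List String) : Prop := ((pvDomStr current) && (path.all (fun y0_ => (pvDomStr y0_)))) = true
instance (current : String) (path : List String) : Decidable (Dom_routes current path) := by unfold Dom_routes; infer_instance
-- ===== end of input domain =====

-- B replaces A's top-down recursion by a bottom-up suffix table built by folding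
-- over the reversed path (alternative decomposition, same cost).

-- the switch dict both Python versions define verbatim
def chessSwitch : PySem.Dict String (PySem.Dict String String) :=
  PySem.Dict.ofList
    [ ("a", PySem.Dict.ofList [("W", "e"),    ("R", "bd")]),
      ("b", PySem.Dict.ofList [("W", "ace"),  ("R", "df")]),
      ("c", PySem.Dict.ofList [("W", "e"),    ("R", "bf")]),
      ("d", PySem.Dict.ofList [("W", "aeg"),  ("R", "bh")]),
      ("e", PySem.Dict.ofList [("W", "acgi"), ("R", "bdfh")]),
      ("f", PySem.Dict.ofList [("W", "cei"),  ("R", "bh")]),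
      ("g", PySem.Dict.ofList [("W", "e"),    ("R", "dh")]),
      ("h", PySem.Dict.ofList [("W", "egi"),  ("R", "df")]),
      ("i", PySem.Dict.ofList [("W", "e"),    ("R", "fh")]) ]

-- switch[state][step]; the getD "" defaults are unreachable under Pre_routes (KeyError in Python)
def sw (state step : String) : String :=
  ((chessSwitch.getD state PySem.Dict.empty).getD step "")

-- ===== PORT A =====
def routes (current : String) (path : List String) : List String :=
  match path with
  | [] => [current]
  | first :: newpath =>
      (sw current first).toList.flatMap (fun state =>
        (routes (String.ofList [state]) newpath).map (fun route => current ++ route))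

-- ===== PORT B =====
-- B's flat move table keyed by (state, colour) pairs
def chessMoves : PySem.Dict (String × String) String :=
  PySem.Dict.ofList
    [ (("a", "W"), "e"),    (("a", "R"), "bd"),
      (("b", "W"), "ace"),  (("b", "R"), "df"),
      (("c", "W"), "e"),    (("c", "R"), "bf"),
      (("d", "W"), "aeg"),  (("d", "R"), "bh"),
      (("e", "W"), "acgi"), (("e", "R"), "bdfh"),
      (("f", "W"), "cei"),  (("f", "R"), "bh"),
      (("g", "W"), "e"),    (("g", "R"), "dh"),
      (("h", "W"), "egi"),  (("h", "R"), "df"),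
      (("i", "W"), "e"),    (("i", "R"), "fh") ]

-- moves[state, step]; the getD "" default is unreachable under Pre_routes (KeyError in Python)
def swB (state step : String) : String := chessMoves.getD (state, step) ""

-- the characters of the literal 'abcdefghi' both table comprehensions in Source B iterate over
def chessStates : List Char := ['a', 'b', 'c', 'd', 'e', 'f', 'g', 'h', 'i']

-- one dict-comprehension level: {s: [s + t for n in moves[s, step] for t in suffixes[n]] for s in 'abcdefghi'}
def sufLevel (suffixes : PySem.Dict String (List String)) (step : String) :
    PySem.Dict String (List String) :=
  PySem.Dict.ofList (chessStates.map (fun s =>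
    (String.ofList [s],
     (swB (String.ofList [s]) step).toList.flatMap (fun n =>
       (suffixes.getD (String.ofList [n]) []).map (fun t => String.ofList [s] ++ t)))))

def routes_alt (current : String) (path : List String) : List String :=
  match path with
  | [] => [current]
  | first :: newpath =>
      let init : PySem.Dict String (List String) :=
        PySem.Dict.ofList (chessStates.map (fun s => (String.ofList [s], [String.ofList [s]])))
      let suffixes := newpath.reverse.foldl sufLevel init
      (swB current first).toList.flatMap (fun n =>
        (suffixes.getD (String.ofList [n]) []).map (fun t => current ++ t))

-- ===== PRECONDITION & SPEC =====
-- Pre_ excludes exactly the inputs where Python A raises KeyError: a path element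
-- other than "W"/"R", or a nonempty path with a start state outside 'a'..'i'.
def Pre_routes (current : String) (path : List String) : Prop :=
  (∀ p ∈ path, p = "W" ∨ p = "R") ∧
  (path = [] ∨ current ∈ ["a", "b", "c", "d", "e", "f", "g", "h", "i"])
instance (current : String) (path : List String) : Decidable (Pre_routes current path) := by
  unfold Pre_routes; infer_instance
def pvWitness_routes : String × List String := ("e", ["W", "R"])
def Spec_routes (current : String) (path : List String) (out : List String) : Prop := out = routes_alt current path
instance (current : String) (path : List String) (out : List String) : Decidable (Spec_routes current path out) := by unfold Spec_routes; infer_instance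

-- ===== CLAIM (what is proved, stated in full; the proofs are below) =====
def Claim_equal_routes : Prop := ∀ (current : String) (path : List String), Dom_routes current path → Pre_routes current path → Spec_routes current path (routes current path)

-- ===== LEMMAS AND PROOFS =====

-- every successor named by the switch is again one of the nine states
-- A's nested lookup and B's flat pair-keyed lookup agree on the nine states
lemma sw_eq_swB (c : Char) (hc : c ∈ chessStates) (f : String) :
    sw (String.ofList [c]) f = swB (String.ofList [c]) f := by
  by_cases h1 : f = "W" <;> by_cases h2 : f = "R" <;> fin_cases hc <;>
    simp_all [sw, swB, chessSwitch, chessMoves, PySem.Dict.ofList, PySem.Dict.update,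
      PySem.Dict.getD_eq_get?_getD, PySem.Dict.get?_insert]

lemma sw_subset (c : Char) (hc : c ∈ chessStates) (f : String) :
    ∀ n ∈ (sw (String.ofList [c]) f).toList, n ∈ chessStates := by
  intro n hn
  by_cases h1 : f = "W" <;> by_cases h2 : f = "R" <;> fin_cases hc <;>
    simp_all [sw, chessSwitch, chessStates, PySem.Dict.ofList, PySem.Dict.update,
      PySem.Dict.getD_eq_get?_getD, PySem.Dict.get?_insert] <;> tauto

-- lookup in a table keyed by the nine states
lemma getD_states (F : Char → List String) (c : Char) (hc : c ∈ chessStates) :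
    (PySem.Dict.ofList (chessStates.map (fun s => (String.ofList [s], F s)))).getD
        (String.ofList [c]) [] = F c := by
  fin_cases hc <;>
    simp [chessStates, PySem.Dict.ofList, PySem.Dict.update,
      PySem.Dict.getD_eq_get?_getD, PySem.Dict.get?_insert]

-- folding all levels over the reversed remaining path yields, at each of the nine
-- states, exactly A's recursive routes from that state
lemma suffixes_spec (p : List String) :
    ∀ c ∈ chessStates,
      ((p.reverse.foldl sufLevel
          (PySem.Dict.ofList (chessStates.map (fun s => (String.ofList [s], [String.ofList [s]]))))).getD
          (String.ofList [c]) [])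
        = routes (String.ofList [c]) p := by
  induction p with
  | nil =>
      intro c hc
      rw [List.reverse_nil, List.foldl_nil, getD_states _ c hc]
      simp [routes]
  | cons f rest ih =>
      intro c hc
      rw [List.reverse_cons, List.foldl_append, List.foldl_cons, List.foldl_nil]
      show (sufLevel _ f).getD (String.ofList [c]) [] = _
      rw [sufLevel, getD_states _ c hc, ← sw_eq_swB c hc f]
      conv_rhs => rw [routes]
      refine List.flatMap_congr (fun n hn => ?_)
      rw [ih n (sw_subset c hc f n hn)]

-- ===== VERDICT (by name: the statement is the Claim_ definition above) =====
theorem routes_spec : Claim_equal_routes := by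
  intro current path _ hpre
  unfold Spec_routes
  obtain ⟨hsteps, hcur⟩ := hpre
  cases path with
  | nil => rfl
  | cons f rest =>
      rcases hcur with h | hc
      · simp at h
      have hc' : ∃ c ∈ chessStates, current = String.ofList [c] := by
        fin_cases hc <;> exact ⟨_, by decide, rfl⟩
      obtain ⟨c, hcmem, rfl⟩ := hc'
      simp only [routes, routes_alt]
      rw [← sw_eq_swB c hcmem f]
      refine List.flatMap_congr (fun n hn => ?_)
      rw [suffixes_spec rest n (sw_subset c hcmem f n hn)]
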